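-- pv_equiv track=rewrite | github.com/yulishuta/algorithms-python | leetcode20.py | getValFromPath
-- ===== SOURCE A (Python) =====
-- def getValFromPath(preValList, leafVal):
--     result = leafVal
--
--     inc = 10
--     lastIndex = len(preValList) - 1
--
--     while(lastIndex != -1):
--         result = result + preValList[lastIndex]*inc
--         inc = inc * 10
--         lastIndex = lastIndex - 1
--
--     return result
-- ===== SOURCE B (Python) =====
-- def getValFromPath(preValList, leafVal):
--     result = 0
--     for v in preValList:
--         result = result * 10 + v
--     return result * 10 + leafVal
-- ===== Notes on version B (the rewrite author's own statement) =====
-- stated objective: idiomatic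
-- what changed: Replaces the backward index-and-power-of-10 loop with a single forward Horner pass that keeps only a running accumulator multiplied by 10 each step.
import Mathlib
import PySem

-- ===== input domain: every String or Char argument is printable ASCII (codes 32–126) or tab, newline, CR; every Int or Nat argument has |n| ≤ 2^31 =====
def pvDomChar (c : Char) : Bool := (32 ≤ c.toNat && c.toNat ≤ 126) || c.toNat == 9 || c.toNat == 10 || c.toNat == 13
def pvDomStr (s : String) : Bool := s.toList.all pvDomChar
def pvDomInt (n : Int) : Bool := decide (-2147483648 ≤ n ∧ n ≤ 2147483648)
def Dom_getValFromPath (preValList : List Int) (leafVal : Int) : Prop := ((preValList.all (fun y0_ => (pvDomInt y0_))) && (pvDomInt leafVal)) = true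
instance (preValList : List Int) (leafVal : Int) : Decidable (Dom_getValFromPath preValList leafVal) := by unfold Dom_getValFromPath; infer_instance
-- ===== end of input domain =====

-- B replaces A's backward index loop with a separate power-of-10 accumulator by a
-- single forward Horner pass keeping only one running accumulator (idiomatic rewrite).


-- ===== PORT A =====
-- A's while loop: lastIndex counts down from len-1 to -1; we recurse on the
-- natural number k = lastIndex + 1, so k = 0 corresponds to lastIndex = -1.
-- The index k-1 is always in range, so list lookup uses getD with a dummy default.
def getValFromPathLoop (preValList : List Int) : Nat → Int → Int → Int
  | 0, result, _ => result
  | k + 1, result, inc =>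
      getValFromPathLoop preValList k (result + (preValList.getD k 0) * inc) (inc * 10)

def getValFromPath (preValList : List Int) (leafVal : Int) : Int :=
  getValFromPathLoop preValList preValList.length leafVal 10

-- ===== PORT B =====
def getValFromPath_alt (preValList : List Int) (leafVal : Int) : Int :=
  (preValList.foldl (fun r v => r * 10 + v) 0) * 10 + leafVal

-- ===== PRECONDITION & SPEC =====
def Spec_getValFromPath (preValList : List Int) (leafVal : Int) (out : Int) : Prop := out = getValFromPath_alt preValList leafVal
instance (preValList : List Int) (leafVal : Int) (out : Int) : Decidable (Spec_getValFromPath preValList leafVal out) := by unfold Spec_getValFromPath; infer_instance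

-- ===== CLAIM (what is proved, stated in full; the proofs are below) =====
def Claim_equal_getValFromPath : Prop := ∀ (preValList : List Int) (leafVal : Int), Dom_getValFromPath preValList leafVal → Spec_getValFromPath preValList leafVal (getValFromPath preValList leafVal)

-- ===== LEMMAS AND PROOFS =====

-- Horner value of a prefix, as B computes it.
def hornerVal (xs : List Int) : Int := xs.foldl (fun r v => r * 10 + v) 0

theorem hornerVal_shift (xs : List Int) (a : Int) :
    xs.foldl (fun r v => r * 10 + v) a = a * 10 ^ xs.length + hornerVal xs := by
  induction xs generalizing a with
  | nil => simp [hornerVal]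
  | cons x t ih =>
      have hx : hornerVal (x :: t) = x * 10 ^ t.length + hornerVal t := by
        show List.foldl (fun r v => r * 10 + v) 0 (x :: t) = _
        rw [List.foldl_cons, ih (0 * 10 + x)]
        ring_nf
      simp only [List.foldl_cons, List.length_cons]
      rw [ih (a * 10 + x), hx]
      ring

theorem getValFromPathLoop_eq (xs : List Int) (k : Nat) (hk : k ≤ xs.length)
    (r inc : Int) :
    getValFromPathLoop xs k r inc = r + inc * hornerVal (xs.take k) := by
  induction k generalizing r inc with
  | zero => simp [getValFromPathLoop, hornerVal]
  | succ k ih =>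
      have hklt : k < xs.length := Nat.lt_of_succ_le hk
      rw [getValFromPathLoop, ih (Nat.le_of_lt hklt)]
      have htake : xs.take (k + 1) = xs.take k ++ [xs.getD k 0] := by
        rw [List.take_add_one]
        simp [List.getElem?_eq_getElem hklt, List.getD_eq_getElem?_getD]
      rw [htake]
      unfold hornerVal
      rw [List.foldl_append]
      simp only [List.foldl_cons, List.foldl_nil]
      rw [hornerVal_shift]
      ring

-- ===== VERDICT (by name: the statement is the Claim_ definition above) =====
theorem getValFromPath_spec : Claim_equal_getValFromPath := by
  intro xs leaf _
  unfold Spec_getValFromPath getValFromPath getValFromPath_alt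
  rw [getValFromPathLoop_eq xs xs.length (le_refl _) leaf 10]
  simp [hornerVal]
  ring
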